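-- pv_equiv track=rewrite | github.com/HoduUlmu/ps | 프로그래머스/LV1/2022_KAKAO_BLIND_RECRUITMENT/신고 결과 받기_2.py | solution
-- ===== SOURCE A (Python) =====
-- import collections
-- import itertools
--
-- def solution(id_list, report, k):
--     reported_dic = collections.defaultdict(list)
--     for case in set(report):
--         who_report, who_reported = case.split()
--         reported_dic[who_reported].append(who_report)
--
--     mail_list = list(itertools.chain(*(x for x in reported_dic.values() if len(x) >= k)))
--     counter = collections.Counter(mail_list)
--     result = [counter.get(_id) if counter.get(_id) else 0 for _id in id_list]
--     return result
-- ===== SOURCE B (Python) =====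
-- def solution(id_list, report, k):
--     pairs = [case.split() for case in set(report)]
--
--     def n_reports(user):
--         return sum(1 for _, r in pairs if r == user)
--
--     return [sum(1 for w, r in pairs if w == _id and n_reports(r) >= k)
--             for _id in id_list]
-- ===== Notes on version B (the rewrite author's own statement) =====
-- stated objective: simpler
-- what changed: B drops all index structures (defaultdict, Counter, banned set): it answers each id directly by brute-force nested counting over the deduplicated split pairs, testing inline whether a reported user's distinct-report count reaches k, instead of A's group-into-lists / filter-by-size / flatten / Counter pipeline.
import Mathlib
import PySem

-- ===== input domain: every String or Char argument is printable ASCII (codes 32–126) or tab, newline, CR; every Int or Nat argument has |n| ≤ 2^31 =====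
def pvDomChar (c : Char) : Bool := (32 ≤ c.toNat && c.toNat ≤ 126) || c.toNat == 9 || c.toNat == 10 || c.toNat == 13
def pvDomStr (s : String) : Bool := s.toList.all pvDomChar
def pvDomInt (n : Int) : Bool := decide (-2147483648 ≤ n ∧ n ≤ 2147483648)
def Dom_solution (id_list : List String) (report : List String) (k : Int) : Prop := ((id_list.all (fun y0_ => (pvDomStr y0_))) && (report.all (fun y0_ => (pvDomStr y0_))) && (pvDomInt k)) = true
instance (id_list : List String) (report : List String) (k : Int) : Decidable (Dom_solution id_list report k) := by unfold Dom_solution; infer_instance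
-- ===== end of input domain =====

-- B answers each id by direct brute-force nested counting over the deduplicated split
-- pairs (no defaultdict/Counter/flatten pipeline) — objective: simpler, not faster.

-- ===== PORT A =====
def solution (id_list : List String) (report : List String) (k : Int) : List Int :=
  let reported_dic : PySem.Dict String (List String) :=
    (PySem.Set.ofList report).foldl (fun d case =>
      let parts := PySem.Str.split₀ case
      d.modify (parts.getD 1 "") [] (fun x => x ++ [parts.getD 0 ""])) PySem.Dict.empty
  let mail_list := (reported_dic.values.filter (fun x => k ≤ (x.length : Int))).flatten
  let counter := PySem.Dict.counter mail_list
  id_list.map (fun _id =>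
    match counter.get? _id with
    | some c => if c == 0 then (0 : Int) else c   -- `counter.get(_id) if counter.get(_id) else 0`
    | none => 0)

-- ===== PORT B =====
def solution_alt (id_list : List String) (report : List String) (k : Int) : List Int :=
  let pairs := (PySem.Set.ofList report).map (fun case => PySem.Str.split₀ case)
  let n_reports := fun (user : String) =>
    ((pairs.filter (fun p => p.getD 1 "" == user)).length : Int)
  id_list.map (fun _id =>
    ((pairs.filter (fun p => p.getD 0 "" == _id && decide (k ≤ n_reports (p.getD 1 "")))).length : Int))

-- ===== PRECONDITION & SPEC =====
-- Pre_ excludes exactly the inputs where some report string does not split into exactly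
-- two whitespace-separated tokens: there the Python A raises ValueError on unpacking
-- `who_report, who_reported = case.split()` (and B's generators raise the same way).
def Pre_solution (id_list : List String) (report : List String) (k : Int) : Prop :=
  ∀ s ∈ report, (PySem.Str.split₀ s).length = 2
instance (id_list : List String) (report : List String) (k : Int) : Decidable (Pre_solution id_list report k) := by unfold Pre_solution; infer_instance

def pvWitness_solution : List String × List String × Int :=
  (["muzi", "frodo", "apeach"], ["muzi frodo", "apeach frodo", "frodo muzi", "muzi frodo"], 2)

def Spec_solution (id_list : List String) (report : List String) (k : Int) (out : List Int) : Prop := out = solution_alt id_list report k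
instance (id_list : List String) (report : List String) (k : Int) (out : List Int) : Decidable (Spec_solution id_list report k out) := by unfold Spec_solution; infer_instance

-- ===== CLAIM (what is proved, stated in full; the proofs are below) =====
def Claim_equal_solution : Prop := ∀ (id_list : List String) (report : List String) (k : Int), Dom_solution id_list report k → Pre_solution id_list report k → Spec_solution id_list report k (solution id_list report k)

-- ===== LEMMAS AND PROOFS =====

-- the deduplicated reports, split into (reported, reporter) pairs
def pvQ (report : List String) : List (String × String) :=
  (PySem.Set.ofList report).map
    (fun c => ((PySem.Str.split₀ c).getD 1 "", (PySem.Str.split₀ c).getD 0 ""))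

-- countP of a filter
theorem pv_countP_filter {α : Type} (l : List α) (p q : α → Bool) :
    List.countP p (l.filter q) = List.countP (fun a => p a && q a) l := by
  induction l with
  | nil => rfl
  | cons a l ih => by_cases h : q a <;> by_cases h2 : p a <;> simp [h, h2, ih]

-- countP splits along any boolean partition of the list
theorem pv_countP_split {α : Type} (l : List α) (p c : α → Bool) :
    List.countP p l
      = List.countP p (l.filter c) + List.countP p (l.filter (fun a => !c a)) := by
  induction l with
  | nil => rfl
  | cons a l ih => by_cases h : c a <;> by_cases h2 : p a <;>
      simp [h, h2, ih] <;> omega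

-- core counting fact: flattening the size-filtered fibers of q over a Nodup covering
-- key list K counts the same multiset as one filtered pass over q
theorem pv_count_fiber (K : List String) (q : List (String × String)) (x : String)
    (P : String → Bool) (hnd : K.Nodup) (hcov : ∀ p ∈ q, p.1 ∈ K) :
    (((K.filter P).map (fun r => (q.filter (fun p => p.1 == r)).map (fun p => p.2))).flatten).count x
      = ((q.filter (fun p => P p.1)).map (fun p => p.2)).count x := by
  induction K generalizing q with
  | nil =>
    have hq : q = [] := by
      cases q with
      | nil => rfl
      | cons p q' => exact absurd (hcov p (by simp)) (by simp)
    subst hq; rfl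
  | cons r K' ih =>
    have hrK' : r ∉ K' := (List.nodup_cons.mp hnd).1
    have hnd' : K'.Nodup := (List.nodup_cons.mp hnd).2
    set q2 := q.filter (fun p => !(p.1 == r)) with hq2
    have hcov2 : ∀ p ∈ q2, p.1 ∈ K' := by
      intro p hp
      rcases List.mem_filter.mp hp with ⟨hpq, hne⟩
      have := hcov p hpq
      simp only [List.mem_cons] at this
      rcases this with h | h
      · simp [h] at hne
      · exact h
    have hfib : ∀ r' ∈ K'.filter P,
        (q.filter (fun p => p.1 == r')).map (fun p => p.2)
          = (q2.filter (fun p => p.1 == r')).map (fun p => p.2) := by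
      intro r' hr'
      have hne : r' ≠ r := by
        intro h; exact hrK' (h ▸ (List.mem_filter.mp hr').1)
      have : q2.filter (fun p => p.1 == r') = q.filter (fun p => p.1 == r') := by
        rw [hq2, List.filter_filter]
        apply List.filter_congr
        intro p _
        by_cases h : p.1 = r'
        · simp [h, hne]
        · simp [h]
      rw [this]
    have hmap :
        (K'.filter P).map (fun r' => (q.filter (fun p => p.1 == r')).map (fun p => p.2))
          = (K'.filter P).map (fun r' => (q2.filter (fun p => p.1 == r')).map (fun p => p.2)) :=
      List.map_congr_left hfib
    have hcount : ∀ (l : List (String × String)) (c : String → Bool),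
        ((l.filter (fun p => c p.1)).map (fun p => p.2)).count x
          = List.countP (fun p => (p.2 == x) && c p.1) l := by
      intro l c
      rw [List.count_eq_countP, List.countP_map, pv_countP_filter]
      rfl
    have hsplit := pv_countP_split q (fun p => (p.2 == x) && P p.1) (fun p => p.1 == r)
    by_cases hPr : P r
    · rw [List.filter_cons_of_pos hPr, List.map_cons, List.flatten_cons,
        List.count_append, hmap, ih q2 hnd' hcov2, hcount, hcount, hsplit, hq2]
      have hfi : List.countP (fun p => (p.2 == x) && P p.1) (q.filter (fun p => p.1 == r))
          = List.count x ((q.filter (fun p => p.1 == r)).map (fun p => p.2)) := by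
        rw [List.count_eq_countP, List.countP_map, pv_countP_filter, pv_countP_filter]
        apply List.countP_congr
        intro p _
        by_cases h : p.1 = r <;> simp [h, hPr, Function.comp]
      omega
    · rw [List.filter_cons_of_neg hPr, hmap, ih q2 hnd' hcov2, hcount, hcount, hsplit, hq2]
      have hz : List.countP (fun p => (p.2 == x) && P p.1) (q.filter (fun p => p.1 == r)) = 0 := by
        rw [List.countP_eq_zero]
        intro p hp
        have h1 : p.1 = r := by
          have := (List.mem_filter.mp hp).2; simpa using this
        simp [h1, hPr]
      omega

-- fold over cases rewritten as a fold over (reported, reporter) pairs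
theorem pv_foldA (S : List String) :
    S.foldl (fun d case => PySem.Dict.modify d ((PySem.Str.split₀ case).getD 1 "") []
        (fun x => x ++ [(PySem.Str.split₀ case).getD 0 ""])) PySem.Dict.empty
      = (S.map (fun c => ((PySem.Str.split₀ c).getD 1 "", (PySem.Str.split₀ c).getD 0 ""))).foldl
          (fun d p => d.modify p.1 [] (fun x => x ++ [p.2])) PySem.Dict.empty := by
  rw [List.foldl_map]

-- A computes, per id, the count of that id in the flattened size-filtered fibers of pvQ
theorem pv_solA (id_list report : List String) (k : Int) :
    solution id_list report k
      = id_list.map (fun x =>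
          (((((PySem.Set.ofList ((pvQ report).map (fun p => p.1))).filter
                (fun r => k ≤ ((((pvQ report).filter (fun p => p.1 == r)).length : Int)))).map
              (fun r => ((pvQ report).filter (fun p => p.1 == r)).map (fun p => p.2))).flatten).count x : Int)) := by
  simp only [solution]
  rw [pv_foldA]
  rw [show (PySem.Set.ofList report).map (fun c => ((PySem.Str.split₀ c).getD 1 "", (PySem.Str.split₀ c).getD 0 "")) = pvQ report from rfl]
  set q := pvQ report with hq
  set D := q.foldl (fun d p => d.modify p.1 [] (fun x => x ++ [p.2])) (PySem.Dict.empty : PySem.Dict String (List String)) with hD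
  have hkeys : D.keys = PySem.Set.ofList (q.map (fun p => p.1)) := by
    have h := PySem.Dict.keys_foldl_modify_key q (fun p => p.1) ([] : List String)
      (fun _ p => fun x => x ++ [p.2]) PySem.Dict.empty
    rw [hD]
    simpa [PySem.Dict.empty, PySem.Dict.keys, PySem.Set.update, PySem.Set.ofList] using h
  have hnd : D.keys.Nodup := by
    have h := PySem.Dict.nodup_keys_foldl_modify_key q (fun p => p.1) ([] : List String)
      (fun _ p => fun x => x ++ [p.2]) PySem.Dict.empty (by simp [PySem.Dict.empty, PySem.Dict.keys])
    rw [hD]; simpa using h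
  have hgetD : ∀ r, D.getD r [] = (q.filter (fun p => p.1 == r)).map (fun p => p.2) := by
    intro r
    have h := PySem.Dict.getD_foldl_modify_append q (PySem.Dict.empty : PySem.Dict String (List String)) r
    rw [hD]; simpa [PySem.Dict.empty, PySem.Dict.getD] using h
  rw [PySem.Dict.values_eq_map_keys D hnd [], hkeys]
  rw [List.filter_map]
  apply List.map_congr_left
  intro x _
  have hmatch : ∀ (m : List String),
      (match (PySem.Dict.counter m).get? x with
        | some c => if c == 0 then (0 : Int) else c
        | none => 0) = (m.count x : Int) := by
    intro m
    have h := PySem.Dict.getD_counter m x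
    have hgd : (PySem.Dict.counter m).getD x 0 = ((PySem.Dict.counter m).get? x).getD 0 := by
      simp [PySem.Dict.getD]
    rw [hgd] at h
    cases hc : (PySem.Dict.counter m).get? x with
    | none => rw [hc] at h; simp at h; simp [← h]
    | some c =>
      rw [hc] at h; simp at h
      by_cases h0 : c = 0 <;> simp [h0] <;> omega
  rw [hmatch]
  have hpred : ∀ r ∈ PySem.Set.ofList (q.map (fun p => p.1)),
      ((fun x => decide (k ≤ (x.length : Int))) ∘ fun r => D.getD r []) r
        = (fun r => decide (k ≤ (((q.filter (fun p => p.1 == r)).length : Int)))) r := by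
    intro r _
    simp [Function.comp, hgetD r]
  rw [List.filter_congr hpred]
  exact congrArg (fun l => (Int.ofNat (List.count x l.flatten)))
    (List.map_congr_left (fun r _ => hgetD r))

-- B computes, per id, a single countP over pvQ: reporter = id and fiber of the
-- reported user has size ≥ k
theorem pv_solB (id_list report : List String) (k : Int) :
    solution_alt id_list report k
      = id_list.map (fun x =>
          ((List.countP (fun p => (p.2 == x) &&
              decide (k ≤ ((((pvQ report).filter (fun p' => p'.1 == p.1)).length : Int))))
            (pvQ report)) : Int)) := by
  simp only [solution_alt]
  apply List.map_congr_left
  intro x _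
  have hfib : ∀ u : String,
      ((((PySem.Set.ofList report).map (fun case => PySem.Str.split₀ case)).filter
          (fun p => p.getD 1 "" == u)).length : Int)
        = ((((pvQ report).filter (fun p' => p'.1 == u)).length : Int)) := by
    intro u
    rw [pvQ, ← List.countP_eq_length_filter, ← List.countP_eq_length_filter,
      List.countP_map, List.countP_map]
    rfl
  rw [← List.countP_eq_length_filter, List.countP_map]
  conv_rhs => rw [pvQ, List.countP_map]
  congr 1
  apply List.countP_congr
  intro c _
  simp only [Function.comp]
  simp only [hfib, pvQ]

-- ===== VERDICT (by name: the statement is the Claim_ definition above) =====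
theorem solution_spec : Claim_equal_solution := by
  intro id_list report k _ _
  unfold Spec_solution
  rw [pv_solA, pv_solB]
  apply List.map_congr_left
  intro x _
  congr 1
  rw [pv_count_fiber _ _ _ _ (PySem.Set.nodup_ofList _)
    (fun p hp => (PySem.Set.mem_ofList _ _).mpr (List.mem_map_of_mem hp))]
  rw [List.count_eq_countP, List.countP_map, pv_countP_filter]
  rfl
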